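-- pv_equiv track=rewrite | github.com/xl666/recursosEstructuras24 | parcial2/codigos/tema10/listaRepetida.py | todos_repetidos_rec
-- ===== SOURCE A (Python) =====
-- def todos_repetidos_rec(lista, acumulador, resultado):
--     if not lista:
--         return resultado
--     frente = lista[0]
--     resto = lista[1:]
--     resultado_parcial = False
--     if frente in resto:
--         resultado_parcial = True
--     if frente in acumulador:
--         resultado_parcial = True
--     acumulador.append(frente)
--     return todos_repetidos_rec(resto, acumulador,
--                                resultado_parcial and resultado)
-- ===== SOURCE B (Python) =====
-- def todos_repetidos_rec(lista, acumulador, resultado):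
--     combinado = acumulador + lista
--     todos = all(combinado.count(x) > 1 for x in lista)
--     acumulador.extend(lista)
--     return todos and resultado
-- ===== Notes on version B (the rewrite author's own statement) =====
-- stated objective: simpler
-- what changed: Replaces the tail recursion threading an accumulator and a partial result with a flat pass: snapshot combinado = acumulador + lista, check all(combinado.count(x) > 1 for x in lista) with early exit, extend acumulador once, and return todos and resultado.
import Mathlib
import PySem

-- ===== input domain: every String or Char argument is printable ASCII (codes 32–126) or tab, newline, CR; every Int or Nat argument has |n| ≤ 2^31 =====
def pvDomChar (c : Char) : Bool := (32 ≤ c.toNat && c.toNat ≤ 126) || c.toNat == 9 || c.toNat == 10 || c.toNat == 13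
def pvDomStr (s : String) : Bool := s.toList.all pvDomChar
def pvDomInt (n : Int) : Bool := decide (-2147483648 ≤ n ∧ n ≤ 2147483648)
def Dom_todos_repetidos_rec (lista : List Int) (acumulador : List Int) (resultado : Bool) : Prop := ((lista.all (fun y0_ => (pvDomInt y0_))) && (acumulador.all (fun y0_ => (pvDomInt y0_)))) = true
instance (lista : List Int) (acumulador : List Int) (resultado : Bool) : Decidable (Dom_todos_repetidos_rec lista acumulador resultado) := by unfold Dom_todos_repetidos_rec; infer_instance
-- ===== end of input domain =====

-- B: flat pass — count each element in acumulador++lista instead of tail recursion; simpler, return value only (both mutate acumulador identically in Python).\nimport Mathlib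


-- ===== PORT A =====
def todos_repetidos_rec (lista : List Int) (acumulador : List Int) (resultado : Bool) : Bool :=
  match lista with
  | [] => resultado
  | frente :: resto =>
    let resultado_parcial0 := false
    let resultado_parcial1 := if resto.contains frente then true else resultado_parcial0
    let resultado_parcial2 := if acumulador.contains frente then true else resultado_parcial1
    todos_repetidos_rec resto (acumulador ++ [frente]) (resultado_parcial2 && resultado)

-- ===== PORT B =====
def todos_repetidos_rec_alt (lista : List Int) (acumulador : List Int) (resultado : Bool) : Bool :=
  let combinado := acumulador ++ lista
  let todos := lista.all (fun x => PySem.List.count combinado x > 1)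
  todos && resultado

-- ===== PRECONDITION & SPEC =====
def Spec_todos_repetidos_rec (lista : List Int) (acumulador : List Int) (resultado : Bool) (out : Bool) : Prop := out = todos_repetidos_rec_alt lista acumulador resultado
instance (lista : List Int) (acumulador : List Int) (resultado : Bool) (out : Bool) : Decidable (Spec_todos_repetidos_rec lista acumulador resultado out) := by unfold Spec_todos_repetidos_rec; infer_instance

-- ===== CLAIM (what is proved, stated in full; the proofs are below) =====
def Claim_equal_todos_repetidos_rec : Prop := ∀ (lista : List Int) (acumulador : List Int) (resultado : Bool), Dom_todos_repetidos_rec lista acumulador resultado → Spec_todos_repetidos_rec lista acumulador resultado (todos_repetidos_rec lista acumulador resultado)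

-- ===== LEMMAS AND PROOFS =====

theorem todos_key (lista acumulador : List Int) (resultado : Bool) :
    todos_repetidos_rec lista acumulador resultado =
      (lista.all (fun x => (acumulador ++ lista).count x > 1) && resultado) := by
  induction lista generalizing acumulador resultado with
  | nil => simp [todos_repetidos_rec]
  | cons f resto ih =>
    have hrp : (decide (f ∈ acumulador) || decide (f ∈ resto))
        = decide (1 < List.count f acumulador + (List.count f resto + 1)) := by
      rw [show (decide (f ∈ acumulador) || decide (f ∈ resto))
            = decide (f ∈ acumulador ∨ f ∈ resto) by simp, decide_eq_decide]
      constructor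
      · rintro (h | h)
        · have := List.count_pos_iff.mpr h; omega
        · have := List.count_pos_iff.mpr h; omega
      · intro h
        by_contra hc
        rcases not_or.mp hc with ⟨h1, h2⟩
        have d1 := List.count_eq_zero_of_not_mem h1
        have d2 := List.count_eq_zero_of_not_mem h2
        omega
    have hassoc : acumulador ++ [f] ++ resto = acumulador ++ f :: resto := by simp
    rw [show todos_repetidos_rec (f :: resto) acumulador resultado
          = todos_repetidos_rec resto (acumulador ++ [f])
              ((if acumulador.contains f then true else
                  if resto.contains f then true else false) && resultado) from rfl]
    simp only [ih, List.all_cons, hassoc, List.count_append, List.count_cons]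
    cases resultado <;> simp [hrp, Bool.and_comm]

-- ===== VERDICT (by name: the statement is the Claim_ definition above) =====
theorem todos_repetidos_rec_spec : Claim_equal_todos_repetidos_rec := by
  intro lista acumulador resultado _
  unfold Spec_todos_repetidos_rec todos_repetidos_rec_alt
  simp [todos_key, PySem.List.count_eq]
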